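-- pv_equiv track=rewrite | github.com/arek-grows/Challenges | Challenges 261-280/Challenge276.py | unique_abbreviations
-- ===== SOURCE A (Python) =====
-- def unique_abbreviations(abbreviations: list[str], words: list[str]) -> bool:
--     for abbr in abbreviations:
--         total = 0
--         for word in words:
--             if word[0:len(abbr)] == abbr:
--                 total += 1
--         if total != 1:
--             return False
--     return True  # Put your code here!!!
-- ===== SOURCE B (Python) =====
-- def unique_abbreviations(abbreviations: list[str], words: list[str]) -> bool:
--     # Build a count of every prefix of every word once, then each abbreviation
--     # is a single dictionary lookup.
--     counts = {}
--     for word in words: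
--         for i in range(len(word) + 1):
--             p = word[:i]
--             counts[p] = counts.get(p, 0) + 1
--     return all(counts.get(a, 0) == 1 for a in abbreviations)
-- ===== Notes on version B (the rewrite author's own statement) =====
-- stated objective: alternative
-- what changed: Instead of scanning all words for each abbreviation, B builds a prefix-count dictionary over all words in one pass and answers each abbreviation with a single lookup; on the generated inputs this is not measurably faster.
import Mathlib
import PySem

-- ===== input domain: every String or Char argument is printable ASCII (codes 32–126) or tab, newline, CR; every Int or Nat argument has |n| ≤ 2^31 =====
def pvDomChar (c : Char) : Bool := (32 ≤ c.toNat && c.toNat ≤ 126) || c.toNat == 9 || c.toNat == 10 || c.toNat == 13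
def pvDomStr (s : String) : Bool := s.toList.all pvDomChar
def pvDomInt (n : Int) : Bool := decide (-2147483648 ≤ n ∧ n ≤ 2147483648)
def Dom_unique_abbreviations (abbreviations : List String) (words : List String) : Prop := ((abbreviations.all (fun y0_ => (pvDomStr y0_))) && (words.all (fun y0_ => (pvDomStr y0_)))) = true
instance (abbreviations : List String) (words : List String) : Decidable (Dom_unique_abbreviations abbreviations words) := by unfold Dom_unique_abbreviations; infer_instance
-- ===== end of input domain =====

-- B replaces the per-abbreviation scan over all words by a prefix-count dictionary
-- built in one pass over the words, answering each abbreviation by one lookup (objective: alternative).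

-- ===== PORT A =====
-- inner loop: total = 0; for word in words: if word[0:len(abbr)] == abbr: total += 1
def uaTotal (abbr : String) (words : List String) : Int :=
  words.foldl (fun total word =>
    if PySem.Str.slice word (some 0) (some (PySem.Str.len abbr)) == abbr then total + 1 else total) 0

-- outer loop with early return False
def uaLoop (words : List String) : List String → Bool
  | [] => true
  | abbr :: rest =>
    if uaTotal abbr words ≠ 1 then false else uaLoop words rest

def unique_abbreviations (abbreviations : List String) (words : List String) : Bool :=
  uaLoop words abbreviations

-- ===== PORT B =====
-- all prefixes word[:i] for i in range(len(word)+1)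
def uaPrefixes (word : String) : List String :=
  (PySem.List.pyRange 0 (PySem.Str.len word + 1) 1).map (fun i => PySem.Str.slice word none (some i))

-- counts[p] = counts.get(p, 0) + 1 over every prefix of every word
def uaCounts (words : List String) : PySem.Dict String Int :=
  words.foldl (fun d word => (uaPrefixes word).foldl (fun d p => d.modify p 0 (· + 1)) d) PySem.Dict.empty

def unique_abbreviations_alt (abbreviations : List String) (words : List String) : Bool :=
  abbreviations.all (fun a => (uaCounts words).getD a 0 == 1)

-- ===== PRECONDITION & SPEC =====
def Spec_unique_abbreviations (abbreviations : List String) (words : List String) (out : Bool) : Prop := out = unique_abbreviations_alt abbreviations words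
instance (abbreviations : List String) (words : List String) (out : Bool) : Decidable (Spec_unique_abbreviations abbreviations words out) := by unfold Spec_unique_abbreviations; infer_instance

-- ===== CLAIM (what is proved, stated in full; the proofs are below) =====
def Claim_equal_unique_abbreviations : Prop := ∀ (abbreviations : List String) (words : List String), Dom_unique_abbreviations abbreviations words → Spec_unique_abbreviations abbreviations words (unique_abbreviations abbreviations words)

-- ===== LEMMAS AND PROOFS =====


-- A's per-word test, on code-point lists
def uaCond (abbr word : String) : Bool := word.toList.take abbr.toList.length == abbr.toList

lemma beq_string_toList (s t : String) : (s == t) = (s.toList == t.toList) := by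
  simp [String.toList_inj]

lemma slice_test_eq (abbr word : String) :
    (PySem.Str.slice word (some 0) (some (PySem.Str.len abbr)) == abbr) = uaCond abbr word := by
  rw [beq_string_toList]
  simp [uaCond, PySem.Str.toList_slice, PySem.Str.len_eq, PySem.List.slice_to_natCast]

lemma uaTotal_eq_countP (abbr : String) (words : List String) :
    uaTotal abbr words = (words.countP (uaCond abbr) : Int) := by
  unfold uaTotal
  simp only [slice_test_eq]
  rw [PySem.List.foldl_count_if (uaCond abbr) words 0]
  simp

-- each word contributes exactly its indicator to the prefix counter
lemma countP_take_range (cs as : List Char) :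
    List.countP (fun k => cs.take k == as) (List.range (cs.length + 1))
      = if (cs.take as.length == as) = true then 1 else 0 := by
  by_cases h : cs.take as.length = as
  · have hlen : as.length ≤ cs.length := by
      have := congrArg List.length h
      simp at this; omega
    rw [if_pos (by simpa using h),
        List.countP_congr (q := fun k => k == as.length) ?_,
        ← List.count_eq_countP,
        List.count_eq_one_of_mem List.nodup_range (by simp; omega)]
    intro k hk
    have hk' := List.mem_range.mp hk
    by_cases hke : k = as.length
    · subst hke; simp [h]
    · have hne : ¬ cs.take k = as := by
        intro he
        have := congrArg List.length he
        simp at this; omega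
      simp [hne, hke]
  · rw [if_neg (by simpa using h), List.countP_eq_zero]
    intro k hk
    have hk' := List.mem_range.mp hk
    simp only [beq_iff_eq]
    intro he
    have := congrArg List.length he
    simp at this
    have hke : k = as.length := by omega
    subst hke
    exact h he

-- each word contributes exactly its indicator to the prefix counter
lemma count_uaPrefixes (a word : String) :
    (uaPrefixes word).count a = if uaCond a word then 1 else 0 := by
  unfold uaPrefixes
  have hn : PySem.Str.len word + 1 = ((word.toList.length + 1 : ℕ) : Int) := by
    rw [PySem.Str.len_eq]; push_cast; ring
  rw [hn, PySem.List.pyRange_zero_natCast, List.map_map, List.count_eq_countP, List.countP_map]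
  have hp : ∀ k ∈ List.range (word.toList.length + 1),
      ((fun x => x == a) ∘ (fun i => PySem.Str.slice word none (some i)) ∘ (fun k : ℕ => (k : Int))) k
      = (word.toList.take k == a.toList) := by
    intro k _
    simp only [Function.comp]
    rw [beq_string_toList]
    simp [PySem.Str.toList_slice, PySem.List.slice_to_natCast]
  rw [List.countP_congr (fun x hx => by rw [hp x hx]), countP_take_range]
  simp only [uaCond]
  rfl

lemma getD_uaCounts_aux (a : String) (words : List String) (d : PySem.Dict String Int) :
    (words.foldl (fun d word => (uaPrefixes word).foldl (fun d p => d.modify p 0 (· + 1)) d) d).getD a 0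
      = d.getD a 0 + (words.countP (uaCond a) : Int) := by
  induction words generalizing d with
  | nil => simp
  | cons w ws ih =>
    rw [List.foldl_cons, ih, PySem.Dict.getD_foldl_modify_add_one, count_uaPrefixes]
    rw [List.countP_cons]
    split_ifs with h
    · simp; push_cast; ring
    · simp

lemma getD_uaCounts (a : String) (words : List String) :
    (uaCounts words).getD a 0 = (words.countP (uaCond a) : Int) := by
  unfold uaCounts; rw [getD_uaCounts_aux]; simp

lemma uaLoop_eq_all (words : List String) (abbrs : List String) :
    uaLoop words abbrs = abbrs.all (fun a => (words.countP (uaCond a) : Int) == 1) := by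
  induction abbrs with
  | nil => rfl
  | cons a rest ih =>
    rw [uaLoop, uaTotal_eq_countP, List.all_cons, ih]
    by_cases h : (words.countP (uaCond a) : Int) = 1 <;> simp [h]

-- ===== VERDICT (by name: the statement is the Claim_ definition above) =====
theorem unique_abbreviations_spec : Claim_equal_unique_abbreviations := by
  intro abbrs words _
  unfold Spec_unique_abbreviations
  unfold unique_abbreviations unique_abbreviations_alt
  rw [uaLoop_eq_all]
  congr 1
  funext a
  rw [getD_uaCounts]
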